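-- pv_equiv track=rewrite | github.com/GrahamOMalley/spiderbro2.0 | spiderbro2.0/piratebaysearcher.py | normalise_show_name
-- ===== SOURCE A (Python) =====
-- def normalise_show_name(name):
--     """
--     strips out characters that might interfere with getting a clean search result
--     """
--     # remove characters we don't want in the name
--     replace_chars =";:@#-!,/"
--     strip_chars ="'()"
--
--     for char in replace_chars:
--         name = name.replace(char, " ")
--
--     for char in strip_chars:
--         name = name.replace(char, "")
--
--     # get rid of extra whitespace
--     name = ' '.join(name.split())
--
--     # TODO: should follow old logic and try multiple strings with & and 'and'
--     name = name.replace('&', 'and')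
--
--     return name
-- ===== SOURCE B (Python) =====
-- def normalise_show_name(name):
--     """
--     strips out characters that might interfere with getting a clean search result
--     """
--     out = []
--     pending = False
--     for ch in name:
--         if ch in ";:@#-!,/" or ch.isspace():
--             if out:
--                 pending = True
--         elif ch in "'()":
--             pass
--         else:
--             if pending:
--                 out.append(' ')
--                 pending = False
--             if ch == '&':
--                 out.extend('and')
--             else:
--                 out.append(ch)
--     return ''.join(out)
-- ===== Notes on version B (the rewrite author's own statement) =====
-- stated objective: alternative
-- what changed: Replaces A's twelve full-string passes (11 str.replace passes plus split/rejoin plus '&' expansion) by a single left-to-right pass over the characters with a pending-space flag that collapses separator runs and strips edges inline.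
import Mathlib
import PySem

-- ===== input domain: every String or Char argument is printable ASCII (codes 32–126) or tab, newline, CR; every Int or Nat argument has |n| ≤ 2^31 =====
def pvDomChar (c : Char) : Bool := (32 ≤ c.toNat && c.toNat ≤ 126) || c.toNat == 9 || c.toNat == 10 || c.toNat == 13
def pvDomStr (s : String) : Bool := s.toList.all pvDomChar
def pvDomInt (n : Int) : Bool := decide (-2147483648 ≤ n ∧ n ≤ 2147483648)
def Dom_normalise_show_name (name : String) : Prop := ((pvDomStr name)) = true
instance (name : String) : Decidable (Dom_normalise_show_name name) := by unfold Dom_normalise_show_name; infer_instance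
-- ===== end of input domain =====

-- B replaces A's eleven str.replace passes plus split/rejoin by one left-to-right pass
-- with a pending-space flag (alternative decomposition, same O(n) cost).


-- ===== PORT A =====
def normalise_show_name (name : String) : String :=
  let replace_chars : String := ";:@#-!,/"
  let strip_chars : String := "'()"
  let n1 := replace_chars.toList.foldl (fun s c => PySem.Str.replace s (String.ofList [c]) " ") name
  let n2 := strip_chars.toList.foldl (fun s c => PySem.Str.replace s (String.ofList [c]) "") n1
  let n3 := PySem.Str.join " " (PySem.Str.split₀ n2)
  PySem.Str.replace n3 "&" "and"

-- ===== PORT B =====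
-- one step of Source B's single pass: out = accumulated chars, flag = pending space
def nsnStep (st : List Char × Bool) (ch : Char) : List Char × Bool :=
  if (";:@#-!,/" : String).toList.contains ch || PySem.Chars.isspace ch then
    (st.1, if st.1.isEmpty then st.2 else true)
  else if ("'()" : String).toList.contains ch then
    st
  else
    let out := if st.2 then st.1 ++ [' '] else st.1
    (out ++ (if ch = '&' then ['a', 'n', 'd'] else [ch]), false)

def normalise_show_name_alt (name : String) : String :=
  String.ofList (name.toList.foldl nsnStep ([], false)).1

-- ===== PRECONDITION & SPEC =====
def Spec_normalise_show_name (name : String) (out : String) : Prop := out = normalise_show_name_alt name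
instance (name : String) (out : String) : Decidable (Spec_normalise_show_name name out) := by unfold Spec_normalise_show_name; infer_instance

-- ===== CLAIM (what is proved, stated in full; the proofs are below) =====
def Claim_equal_normalise_show_name : Prop := ∀ (name : String), Dom_normalise_show_name name → Spec_normalise_show_name name (normalise_show_name name)

-- ===== LEMMAS AND PROOFS =====

-- per-character classification used by the proof
def nsnRepl (c : Char) : Char := if c ∈ [';', ':', '@', '#', '-', '!', ',', '/'] then ' ' else c
def nsnStrip (c : Char) : Bool := c ∈ ['\'', '(', ')']
def nsnE (c : Char) : List Char := if c = '&' then ['a', 'n', 'd'] else [c]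
def nsnT (l : List Char) : List Char := (l.map nsnRepl).filter (fun c => !nsnStrip c)

-- the whitespace-only fold B reduces to after classification
def nsnWStep (st : List Char × Bool) (c : Char) : List Char × Bool :=
  if PySem.Chars.isspace c then (st.1, if st.1.isEmpty then st.2 else true)
  else ((if st.2 then st.1 ++ [' '] else st.1) ++ nsnE c, false)

-- word structure of split₀ after a non-space head
def nsnWordRest : List Char → List Char
  | [] => []
  | c :: t => if PySem.Chars.isspace c then [] else c :: nsnWordRest t

def nsnTailWords : List Char → List (List Char)
  | [] => []
  | c :: t => if PySem.Chars.isspace c then PySem.Chars.split₀ t else nsnTailWords t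

def nsnJoinRest (ws : List (List Char)) : List Char :=
  (ws.map (fun w => ' ' :: w.flatMap nsnE)).flatten

-- A's result on the classified character list: '&'-expanded words joined by single spaces
def nsnJ (t : List Char) : List Char :=
  match PySem.Chars.split₀ t with
  | [] => []
  | w :: ws => w.flatMap nsnE ++ nsnJoinRest ws

theorem nsn_repl_list : (";:@#-!,/" : String).toList = [';', ':', '@', '#', '-', '!', ',', '/'] := rfl
theorem nsn_strip_list : ("'()" : String).toList = ['\'', '(', ')'] := rfl

-- single-character str.replace is a flatMap
theorem nsn_replace_go (c : Char) (d : List Char) :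
    ∀ (l acc : List Char) (fuel : Nat), l.length ≤ fuel →
      PySem.Chars.replace.go [c] d fuel l acc
        = acc.reverse ++ l.flatMap (fun x => if x = c then d else [x]) := by
  intro l
  induction l with
  | nil => intro acc fuel _; cases fuel <;> simp [PySem.Chars.replace.go]
  | cons x t ih =>
    intro acc fuel hf
    cases fuel with
    | zero => simp at hf
    | succ f =>
      by_cases hx : c = x
      · subst hx
        have hpre : [c].isPrefixOf (c :: t) = true := by simp [List.isPrefixOf]
        simp only [PySem.Chars.replace.go, hpre, if_true]
        rw [show List.drop [c].length (c :: t) = t from rfl,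
            ih (d.reverse ++ acc) f (by simpa using hf)]
        simp
      · have hpre : [c].isPrefixOf (x :: t) = false := by
          simp [List.isPrefixOf]; exact hx
        simp only [PySem.Chars.replace.go, hpre, Bool.false_eq_true, if_false]
        rw [ih (x :: acc) f (by simpa using hf)]
        rw [List.flatMap_cons, if_neg (fun h => hx h.symm)]
        simp

theorem nsn_replace_single (s : List Char) (c : Char) (d : List Char) :
    PySem.Chars.replace s [c] d = s.flatMap fun x => if x = c then d else [x] := by
  simp only [PySem.Chars.replace, List.isEmpty_cons, Bool.false_eq_true, if_false]
  rw [nsn_replace_go c d s [] s.length (le_refl _)]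
  simp

-- split₀.go: the words accumulator prepends
theorem nsn_split_go_acc :
    ∀ (t cur : List Char) (accW : List (List Char)),
      PySem.Chars.split₀.go t cur accW = accW.reverse ++ PySem.Chars.split₀.go t cur [] := by
  intro t
  induction t with
  | nil =>
    intro cur accW
    by_cases h : cur.isEmpty <;> simp [PySem.Chars.split₀.go, h]
  | cons c rest ih =>
    intro cur accW
    by_cases hs : PySem.Chars.isspace c = true
    · by_cases h : cur.isEmpty
      · simp only [PySem.Chars.split₀.go, hs, if_true, h]
        rw [ih [] accW]
      · simp only [PySem.Chars.split₀.go, hs, if_true, h, Bool.false_eq_true, if_false]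
        rw [ih [] (cur.reverse :: accW), ih [] [cur.reverse]]
        simp
    · simp only [PySem.Chars.split₀.go, hs, Bool.false_eq_true, if_false]
      rw [ih (c :: cur) accW]

-- split₀.go with a word in progress: first word = cur.reverse ++ rest of the word
theorem nsn_split_go_word :
    ∀ (t cur : List Char), cur ≠ [] →
      PySem.Chars.split₀.go t cur [] = (cur.reverse ++ nsnWordRest t) :: nsnTailWords t := by
  intro t
  induction t with
  | nil =>
    intro cur hc
    simp [PySem.Chars.split₀.go, List.isEmpty_iff, hc, nsnWordRest, nsnTailWords]
  | cons c rest ih =>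
    intro cur hc
    by_cases hs : PySem.Chars.isspace c = true
    · simp only [PySem.Chars.split₀.go, hs, if_true, List.isEmpty_iff, hc]
      rw [nsn_split_go_acc rest [] [cur.reverse]]
      simp [nsnWordRest, nsnTailWords, hs, PySem.Chars.split₀]
    · simp only [PySem.Chars.split₀.go, hs, Bool.false_eq_true, if_false]
      rw [ih (c :: cur) (by simp)]
      simp [nsnWordRest, nsnTailWords, hs]

theorem nsn_split_cons_space (c : Char) (t : List Char) (h : PySem.Chars.isspace c = true) :
    PySem.Chars.split₀ (c :: t) = PySem.Chars.split₀ t := by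
  simp [PySem.Chars.split₀, PySem.Chars.split₀.go, h]

theorem nsn_split_cons_nonspace (c : Char) (t : List Char) (h : ¬ PySem.Chars.isspace c = true) :
    PySem.Chars.split₀ (c :: t) = (c :: nsnWordRest t) :: nsnTailWords t := by
  simp only [PySem.Chars.split₀, PySem.Chars.split₀.go, h, Bool.false_eq_true, if_false] at *
  rw [nsn_split_go_word t [c] (by simp)]
  simp

theorem nsn_intercalate_flatMap (w : List Char) (ws : List (List Char)) :
    (List.intercalate [' '] (w :: ws)).flatMap nsnE = w.flatMap nsnE ++ nsnJoinRest ws := by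
  induction ws generalizing w with
  | nil => simp [List.intercalate, nsnJoinRest]
  | cons w2 ws ih =>
    rw [show List.intercalate [' '] (w :: w2 :: ws) = w ++ [' '] ++ List.intercalate [' '] (w2 :: ws)
      from by simp [List.intercalate, List.intersperse]]
    simp only [List.flatMap_append, ih w2]
    simp [nsnJoinRest, nsnE]

theorem nsn_flatMap_join (t : List Char) :
    (PySem.Chars.join [' '] (PySem.Chars.split₀ t)).flatMap nsnE = nsnJ t := by
  unfold nsnJ
  cases hsp : PySem.Chars.split₀ t with
  | nil => simp [PySem.Chars.join, List.intercalate]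
  | cons w ws => simp [PySem.Chars.join, nsn_intercalate_flatMap]

theorem nsn_J_cons_space (c : Char) (t : List Char) (h : PySem.Chars.isspace c = true) :
    nsnJ (c :: t) = nsnJ t := by
  unfold nsnJ
  rw [nsn_split_cons_space c t h]

-- a leading space region of t contributes exactly one separator when t still has a word
theorem nsn_dagger (t : List Char) :
    (if ¬PySem.Chars.split₀ t = [] ∧ PySem.Chars.isspace (t.headD 'x') = true then [' '] else [])
        ++ nsnJ t
      = (nsnWordRest t).flatMap nsnE ++ nsnJoinRest (nsnTailWords t) := by
  cases t with
  | nil => simp [nsnJ, PySem.Chars.split₀, PySem.Chars.split₀.go, nsnWordRest, nsnTailWords, nsnJoinRest]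
  | cons d t' =>
    by_cases hd : PySem.Chars.isspace d = true
    · rw [nsn_J_cons_space d t' hd, nsn_split_cons_space d t' hd]
      simp only [List.headD_cons, hd, and_true, nsnWordRest, nsnTailWords, if_true]
      cases hsp : PySem.Chars.split₀ t' with
      | nil => simp [nsnJ, hsp, nsnJoinRest]
      | cons w ws => simp [nsnJ, hsp, nsnJoinRest]
    · rw [nsn_split_cons_nonspace d t' hd]
      simp only [List.headD_cons, hd, and_false, nsnWordRest, nsnTailWords,
        Bool.false_eq_true, if_false, reduceCtorEq, not_false_iff, List.nil_append]
      rw [nsnJ, nsn_split_cons_nonspace d t' hd]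

-- invariant of the whitespace fold: state (acc, p) with (acc = [] → p = false)
theorem nsn_K :
    ∀ (t acc : List Char) (p : Bool), (acc = [] → p = false) →
      (t.foldl nsnWStep (acc, p)).1
        = acc ++ (if PySem.Chars.split₀ t ≠ [] ∧ (p = true ∨ (acc ≠ [] ∧ PySem.Chars.isspace (t.headD 'x') = true)) then [' '] else []) ++ nsnJ t := by
  intro t
  induction t with
  | nil =>
    intro acc p h
    simp [nsnJ, PySem.Chars.split₀, PySem.Chars.split₀.go]
  | cons c t ih =>
    intro acc p h
    by_cases hs : PySem.Chars.isspace c = true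
    · rw [List.foldl_cons, show nsnWStep (acc, p) c = (acc, if acc.isEmpty then p else true) from by
        simp [nsnWStep, hs]]
      rcases eq_or_ne acc [] with hacc | hacc
      · subst hacc
        rw [h rfl]
        simp only [List.isEmpty_nil, if_true]
        rw [ih [] false (fun _ => rfl), nsn_J_cons_space c t hs]
        simp [nsn_split_cons_space c t hs]
      · simp only [List.isEmpty_iff, hacc, if_false]
        rw [ih acc true (fun he => absurd he hacc), nsn_J_cons_space c t hs]
        simp [nsn_split_cons_space c t hs, hs, hacc]
    · rw [List.foldl_cons, show nsnWStep (acc, p) c = ((if p then acc ++ [' '] else acc) ++ nsnE c, false) from by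
        simp [nsnWStep, hs]]
      have hne : nsnE c ≠ [] := by unfold nsnE; split <;> simp
      rw [ih _ false (fun he => by simp [hne] at he)]
      rw [nsn_split_cons_nonspace c t hs]
      simp only [ne_eq, reduceCtorEq, not_false_iff, true_and, false_or, List.headD_cons, hs]
      have hne' : (if p = true then acc ++ [' '] else acc) ++ nsnE c ≠ [] := by simp [hne]
      simp only [hne', false_or, and_false, if_false, ne_eq, not_false_iff, true_and]
      rw [show nsnJ (c :: t) = nsnE c ++ ((nsnWordRest t).flatMap nsnE ++ nsnJoinRest (nsnTailWords t)) from by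
        rw [nsnJ, nsn_split_cons_nonspace c t hs]; simp]
      rw [← nsn_dagger t]
      cases p <;> simp

-- B's pass over the raw characters is the whitespace fold over the classified characters
theorem nsn_M :
    ∀ (l : List Char) (st : List Char × Bool),
      l.foldl nsnStep st = (nsnT l).foldl nsnWStep st := by
  intro l
  induction l with
  | nil => intro st; rfl
  | cons c l ih =>
    intro st
    rw [List.foldl_cons]
    by_cases hR : c ∈ [';', ':', '@', '#', '-', '!', ',', '/']
    · have h1 : nsnStep st c = nsnWStep st ' ' := by
        unfold nsnStep nsnWStep
        rw [nsn_repl_list]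
        fin_cases hR <;> rfl
      have h2 : nsnT (c :: l) = ' ' :: nsnT l := by
        unfold nsnT
        rw [List.map_cons, show nsnRepl c = ' ' from by unfold nsnRepl; rw [if_pos hR]]
        rfl
      rw [h1, h2, List.foldl_cons, ih]
    · by_cases hS : nsnStrip c = true
      · have h1 : nsnStep st c = st := by
          unfold nsnStep
          rw [nsn_repl_list, nsn_strip_list]
          have hS' : c ∈ ['\'', '(', ')'] := by simpa [nsnStrip] using hS
          fin_cases hS' <;> rfl
        have h2 : nsnT (c :: l) = nsnT l := by
          unfold nsnT
          rw [List.map_cons, show nsnRepl c = c from by unfold nsnRepl; rw [if_neg hR]]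
          simp [hS]
        rw [h1, h2, ih]
      · have hrc : nsnRepl c = c := by unfold nsnRepl; rw [if_neg hR]
        have h2 : nsnT (c :: l) = c :: nsnT l := by
          unfold nsnT
          rw [List.map_cons, hrc]
          simp [hS]
        have hcontR : ((";:@#-!,/" : String).toList.contains c) = false := by
          rw [nsn_repl_list]; simpa using hR
        have hcontS : (("'()" : String).toList.contains c) = false := by
          rw [nsn_strip_list]; unfold nsnStrip at hS; simpa using hS
        by_cases hsp : PySem.Chars.isspace c = true
        · have h1 : nsnStep st c = nsnWStep st c := by
            unfold nsnStep nsnWStep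
            rw [hcontR, hsp]
            simp
          rw [h1, h2, List.foldl_cons, ih]
        · have h1 : nsnStep st c = nsnWStep st c := by
            unfold nsnStep nsnWStep
            rw [hcontR, hcontS]
            simp only [Bool.false_eq_true, if_false, Bool.or_false, hsp, nsnE]
          rw [h1, h2, List.foldl_cons, ih]

theorem nsn_join_bridge (s : String) :
    (PySem.Str.join " " (PySem.Str.split₀ s)).toList
      = PySem.Chars.join [' '] (PySem.Chars.split₀ s.toList) := by
  simp [PySem.Str.join, PySem.Str.split₀, String.toList_ofList, Function.comp_def]

theorem nsn_flatMap_ite_map (c : Char) (l : List Char) :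
    (l.flatMap fun x => if x = c then [' '] else [x]) = l.map fun x => if x = c then ' ' else x := by
  induction l with
  | nil => rfl
  | cons x t ih => by_cases h : x = c <;> simp [h, ih]

theorem nsn_flatMap_ite_nil (c : Char) (l : List Char) :
    (l.flatMap fun x => if x = c then [] else [x]) = l.filter fun x => !decide (x = c) := by
  induction l with
  | nil => rfl
  | cons x t ih => by_cases h : x = c <;> simp [h, ih]

-- A's eleven replace passes + split/join, read back as words of the classified list
theorem nsn_A_toList (name : String) :
    (normalise_show_name name).toList
      = (PySem.Chars.join [' '] (PySem.Chars.split₀ (nsnT name.toList))).flatMap nsnE := by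
  unfold normalise_show_name
  simp only [nsn_repl_list, nsn_strip_list, List.foldl_cons, List.foldl_nil]
  rw [PySem.Str.toList_replace, nsn_join_bridge]
  simp only [PySem.Str.toList_replace, String.toList_ofList]
  rw [show ("&" : String).toList = ['&'] from rfl, show ("and" : String).toList = ['a','n','d'] from rfl,
      show (" " : String).toList = [' '] from rfl, show ("" : String).toList = ([] : List Char) from rfl]
  simp only [nsn_replace_single, nsn_flatMap_ite_map, nsn_flatMap_ite_nil]
  rw [show (fun x => if x = '&' then ['a','n','d'] else [x]) = nsnE from by funext x; simp [nsnE]]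
  congr 3
  simp only [List.map_map, List.filter_filter]
  unfold nsnT
  rw [List.map_congr_left (g := nsnRepl) (fun a _ => by
    by_cases h : a ∈ [';', ':', '@', '#', '-', '!', ',', '/']
    · fin_cases h <;> rfl
    · simp only [List.mem_cons, not_or] at h
      obtain ⟨h1, h2, h3, h4, h5, h6, h7, h8⟩ := h
      simp [nsnRepl, Function.comp, h1, h2, h3, h4, h5, h6, h7, h8])]
  exact List.filter_congr (fun x _ => by
    by_cases g1 : x = '\'' <;> by_cases g2 : x = '(' <;> by_cases g3 : x = ')' <;>
      simp [nsnStrip, g1, g2, g3])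

-- ===== VERDICT (by name: the statement is the Claim_ definition above) =====
theorem normalise_show_name_spec : Claim_equal_normalise_show_name := by
  unfold Claim_equal_normalise_show_name Spec_normalise_show_name
  intro name _
  apply String.toList_inj.mp
  rw [nsn_A_toList, show (normalise_show_name_alt name).toList = (name.toList.foldl nsnStep ([], false)).1 from by
    simp [normalise_show_name_alt, String.toList_ofList]]
  rw [nsn_M, nsn_K (nsnT name.toList) [] false (fun _ => rfl), nsn_flatMap_join]
  simp
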